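-- pv_equiv track=rewrite | github.com/mahdihoumanii/glas | glaslib/getct.py | _count_external
-- ===== SOURCE A (Python) =====
-- from typing import Tuple, Dict, List, Optional
--
-- def _split_process(process_str: str) -> Tuple[List[str], List[str]]:
--     s = process_str.strip()
--     if "->" in s:
--         lhs, rhs = s.split("->", 1)
--     elif ">" in s:
--         lhs, rhs = s.split(">", 1)
--     else:
--         raise ValueError("Process must contain '>' or '->'")
--     lhs_tokens = [t.strip() for t in lhs.strip().split() if t.strip()]
--     rhs_tokens = [t.strip() for t in rhs.strip().split() if t.strip()]
--     return lhs_tokens, rhs_tokens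
--
-- def _count_external(process_str: str) -> Tuple[int, int, int]:
--     """
--     Returns:
--       n_ext  : total external legs
--       nhext  : number of external massive mt legs (t,t~ aliases)
--       ng     : number of gluons
--     """
--     lhs, rhs = _split_process(process_str)
--     toks = [t.lower() for t in (lhs + rhs)]
--     n_ext = len(toks)
--
--     massive_aliases = {"t", "t~", "tbar", "top", "topb", "top~", "tb", "t_b"}
--     nhext = sum(1 for t in toks if t in massive_aliases)
--
--     ng = sum(1 for t in toks if t == "g")
--     return n_ext, nhext, ng
-- ===== SOURCE B (Python) =====
-- from typing import Tuple, List
--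
-- def _split_process(process_str: str) -> Tuple[List[str], List[str]]:
--     s = process_str.strip()
--     if "->" in s:
--         lhs, rhs = s.split("->", 1)
--     elif ">" in s:
--         lhs, rhs = s.split(">", 1)
--     else:
--         raise ValueError("Process must contain '>' or '->'")
--     lhs_tokens = [t.strip() for t in lhs.strip().split() if t.strip()]
--     rhs_tokens = [t.strip() for t in rhs.strip().split() if t.strip()]
--     return lhs_tokens, rhs_tokens
--
-- # per-token contribution vector (d_n_ext, d_nhext, d_ng); unknown tokens contribute (1, 0, 0)
-- _CONTRIB = {
--     "g": (1, 0, 1),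
--     "t": (1, 1, 0), "t~": (1, 1, 0), "tbar": (1, 1, 0), "top": (1, 1, 0),
--     "topb": (1, 1, 0), "top~": (1, 1, 0), "tb": (1, 1, 0), "t_b": (1, 1, 0),
-- }
--
-- def _count_external(process_str: str) -> Tuple[int, int, int]:
--     lhs, rhs = _split_process(process_str)
--     n_ext = nhext = ng = 0
--     for t in lhs + rhs:
--         dn, dh, dg = _CONTRIB.get(t.lower(), (1, 0, 0))
--         n_ext += dn
--         nhext += dh
--         ng += dg
--     return n_ext, nhext, ng
-- ===== Notes on version B (the rewrite author's own statement) =====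
-- stated objective: alternative
-- what changed: B replaces A's three staged scans over the token list (length, alias-membership count, gluon count) with a single pass that classifies each token once through a precomputed contribution-vector table and adds its (n_ext, nhext, ng) increment triple to one accumulator.
import Mathlib
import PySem

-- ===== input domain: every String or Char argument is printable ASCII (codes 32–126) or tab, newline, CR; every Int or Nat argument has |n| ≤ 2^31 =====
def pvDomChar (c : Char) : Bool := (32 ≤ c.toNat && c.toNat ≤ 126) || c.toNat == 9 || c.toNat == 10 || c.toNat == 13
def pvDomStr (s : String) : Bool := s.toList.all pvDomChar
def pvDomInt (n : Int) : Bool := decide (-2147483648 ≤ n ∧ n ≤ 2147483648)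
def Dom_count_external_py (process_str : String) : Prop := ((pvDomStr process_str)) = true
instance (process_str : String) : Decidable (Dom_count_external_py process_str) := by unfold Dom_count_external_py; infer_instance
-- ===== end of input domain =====

-- B makes ONE pass over the tokens, classifying each through a precomputed contribution-vector
-- table and summing increment triples, instead of A's three staged scans (alternative decomposition).


-- shared helper: both Pythons call the same _split_process; 'none' is exactly where it raises ValueError
def pvSplitProcess? (process_str : String) : Option (List String × List String) :=
  let s := PySem.Str.strip process_str
  let parts? : Option (String × String) :=
    if PySem.Str.isIn "->" s then
      match PySem.Str.splitMax? s "->" 1 with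
      | some (lhs :: rhs :: _) => some (lhs, rhs)
      | _ => none
    else if PySem.Str.isIn ">" s then
      match PySem.Str.splitMax? s ">" 1 with
      | some (lhs :: rhs :: _) => some (lhs, rhs)
      | _ => none
    else none
  parts?.map (fun p =>
    (((PySem.Str.split₀ (PySem.Str.strip p.1)).map PySem.Str.strip).filter (fun t => t != ""),
     ((PySem.Str.split₀ (PySem.Str.strip p.2)).map PySem.Str.strip).filter (fun t => t != "")))

def pvMassiveAliases : List String := ["t", "t~", "tbar", "top", "topb", "top~", "tb", "t_b"]

-- ===== PORT A =====
def count_external_py (process_str : String) : Int × Int × Int :=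
  match pvSplitProcess? process_str with
  | none => (0, 0, 0)          -- unreachable under Pre_ (Python raises ValueError here)
  | some (lhs, rhs) =>
    let toks := (lhs ++ rhs).map PySem.Str.lower
    let n_ext : Int := toks.length
    let nhext : Int := toks.foldl (fun acc t => if pvMassiveAliases.contains t then acc + 1 else acc) 0
    let ng : Int := toks.foldl (fun acc t => if t == "g" then acc + 1 else acc) 0
    (n_ext, nhext, ng)

-- ===== PORT B =====
-- B's contribution table _CONTRIB (a dict literal in Source B)
def pvContrib : PySem.Dict String (Int × Int × Int) :=
  PySem.Dict.ofList
    [("g", (1, 0, 1)),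
     ("t", (1, 1, 0)), ("t~", (1, 1, 0)), ("tbar", (1, 1, 0)), ("top", (1, 1, 0)),
     ("topb", (1, 1, 0)), ("top~", (1, 1, 0)), ("tb", (1, 1, 0)), ("t_b", (1, 1, 0))]

def count_external_py_alt (process_str : String) : Int × Int × Int :=
  match pvSplitProcess? process_str with
  | none => (0, 0, 0)          -- unreachable under Pre_ (Python raises ValueError here)
  | some (lhs, rhs) =>
    (lhs ++ rhs).foldl
      (fun acc t =>
        let c := pvContrib.getD (PySem.Str.lower t) (1, 0, 0)
        (acc.1 + c.1, acc.2.1 + c.2.1, acc.2.2 + c.2.2))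
      (0, 0, 0)

-- ===== PRECONDITION & SPEC =====
-- Pre_ excludes exactly the inputs lacking an arrow separator, on which A's _split_process raises ValueError.
def Pre_count_external_py (process_str : String) : Prop :=
  PySem.Str.isIn ">" process_str = true
instance (process_str : String) : Decidable (Pre_count_external_py process_str) := by
  unfold Pre_count_external_py; infer_instance

def pvWitness_count_external_py : String := "g g -> t t~ g"

def Spec_count_external_py (process_str : String) (out : Int × Int × Int) : Prop := out = count_external_py_alt process_str
instance (process_str : String) (out : Int × Int × Int) : Decidable (Spec_count_external_py process_str out) := by unfold Spec_count_external_py; infer_instance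

-- ===== CLAIM (what is proved, stated in full; the proofs are below) =====
def Claim_equal_count_external_py : Prop := ∀ (process_str : String), Dom_count_external_py process_str → Pre_count_external_py process_str → Spec_count_external_py process_str (count_external_py process_str)

-- ===== LEMMAS AND PROOFS =====

-- looking a token up in B's table yields exactly the indicator triple A's three scans use
lemma pv_contrib_spec (s : String) :
    pvContrib.getD s (1, 0, 0)
      = (1, (if pvMassiveAliases.contains s then (1 : Int) else 0),
            (if s == "g" then (1 : Int) else 0)) := by
  have hmk : pvContrib = PySem.Dict.mk
      [("g", (1, 0, 1)),
       ("t", (1, 1, 0)), ("t~", (1, 1, 0)), ("tbar", (1, 1, 0)), ("top", (1, 1, 0)),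
       ("topb", (1, 1, 0)), ("top~", (1, 1, 0)), ("tb", (1, 1, 0)), ("t_b", (1, 1, 0))] := by
    decide
  by_cases h1 : s = "g"
  · subst h1; decide
  by_cases h2 : s = "t"
  · subst h2; decide
  by_cases h3 : s = "t~"
  · subst h3; decide
  by_cases h4 : s = "tbar"
  · subst h4; decide
  by_cases h5 : s = "top"
  · subst h5; decide
  by_cases h6 : s = "topb"
  · subst h6; decide
  by_cases h7 : s = "top~"
  · subst h7; decide
  by_cases h8 : s = "tb"
  · subst h8; decide
  by_cases h9 : s = "t_b"
  · subst h9; decide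
  rw [hmk]
  simp [pvMassiveAliases, PySem.Dict.getD, PySem.Dict.get?,
    Ne.symm h1, Ne.symm h2, Ne.symm h3, Ne.symm h4, Ne.symm h5, Ne.symm h6, Ne.symm h7,
    Ne.symm h8, Ne.symm h9, h1]
  exact ⟨h2, h3, h4, h5, h6, h7, h8, h9⟩

-- B's single fold computes the three counts A computes in three passes
lemma pv_fold_contrib (toks : List String) (a b c : Int) :
    toks.foldl
        (fun acc t =>
          let x := pvContrib.getD (PySem.Str.lower t) (1, 0, 0)
          (acc.1 + x.1, acc.2.1 + x.2.1, acc.2.2 + x.2.2))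
        (a, b, c)
      = (a + (toks.map PySem.Str.lower).length,
         b + ((toks.map PySem.Str.lower).countP (fun t => pvMassiveAliases.contains t) : Int),
         c + ((toks.map PySem.Str.lower).count "g" : Int)) := by
  induction toks generalizing a b c with
  | nil => simp
  | cons t ts ih =>
    simp only [List.foldl_cons, List.map_cons, List.length_cons,
      List.countP_cons, List.count_cons]
    rw [ih, pv_contrib_spec]
    by_cases hm : pvMassiveAliases.contains (PySem.Str.lower t) <;>
      by_cases hg : PySem.Str.lower t = "g" <;>
      simp [hg, Prod.ext_iff] <;> (repeat' constructor) <;> first | decide | omega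

-- ===== VERDICT (by name: the statement is the Claim_ definition above) =====
theorem count_external_py_spec : Claim_equal_count_external_py := by
  intro s _ _
  unfold Spec_count_external_py count_external_py count_external_py_alt
  cases hsp : pvSplitProcess? s with
  | none => rfl
  | some p =>
    obtain ⟨lhs, rhs⟩ := p
    simp only [pv_fold_contrib, PySem.List.foldl_if_add_one,
      List.count_eq_countP, zero_add]
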